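-- pv_equiv track=rewrite | github.com/marswierzbicki/covid-19_reporting | main.py | repair_negative_cases
-- ===== SOURCE A (Python) =====
-- def repair_negative_cases(covid_cases):
--     """Check for negative cases and bring them to previous days."""
--     covid_cases_date_keys_desc = sorted(covid_cases.keys(), reverse=True)
--     for date_key in covid_cases_date_keys_desc:
--         for region in covid_cases[date_key]:
--             if covid_cases[date_key][region] < 0:
--                 cases_for_move = covid_cases[date_key][region]
--                 covid_cases[date_key][region] = 0
--                 for backward_date_key in covid_cases_date_keys_desc:
--                     if backward_date_key < date_key and region in covid_cases[backward_date_key]: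
--                         covid_cases[backward_date_key][region] += cases_for_move
--                         break
--     return covid_cases
-- ===== SOURCE B (Python) =====
-- def repair_negative_cases(covid_cases):
--     """Check for negative cases and bring them to previous days.
--
--     Single backward pass: walk the dates from latest to earliest carrying,
--     per region, the (non-positive) amount still to be moved to an earlier
--     day; at each day the carried debt is absorbed into that day's count.
--     Mutates covid_cases in place and returns it, like the original.
--     """
--     debt = {}
--     for date_key in sorted(covid_cases, reverse=True):
--         day = covid_cases[date_key]
--         for region in day:
--             v = day[region] + debt.get(region, 0)
--             day[region] = max(v, 0)
--             debt[region] = min(v, 0)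
--     return covid_cases
-- ===== Notes on version B (the rewrite author's own statement) =====
-- stated objective: alternative
-- what changed: Replaced the per-negative backward rescan of the whole date list by a single backward pass that carries, per region, the pending negative amount in a dict and absorbs it at the next earlier day containing the region.
import Mathlib
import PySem

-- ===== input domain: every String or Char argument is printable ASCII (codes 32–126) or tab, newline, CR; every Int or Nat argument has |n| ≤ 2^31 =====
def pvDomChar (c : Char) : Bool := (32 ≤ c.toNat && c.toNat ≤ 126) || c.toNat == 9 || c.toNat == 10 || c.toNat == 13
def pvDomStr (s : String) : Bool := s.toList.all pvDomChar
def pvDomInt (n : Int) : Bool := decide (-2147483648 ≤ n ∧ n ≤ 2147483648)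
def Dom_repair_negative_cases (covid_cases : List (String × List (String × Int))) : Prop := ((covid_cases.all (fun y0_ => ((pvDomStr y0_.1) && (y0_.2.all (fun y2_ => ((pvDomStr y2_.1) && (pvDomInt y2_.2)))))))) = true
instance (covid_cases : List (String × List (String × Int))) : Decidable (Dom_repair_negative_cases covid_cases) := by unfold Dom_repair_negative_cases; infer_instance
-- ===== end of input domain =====

-- B replaces A's per-negative backward rescan of the date list by one backward pass
-- carrying per-region pending negatives in a dict (an alternative algorithm); B
-- mutates its argument in place exactly as A does, so the equivalence proved on
-- return values covers the observable effect as well.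


-- ===== PORT A =====
-- the inner `for backward_date_key in covid_cases_date_keys_desc: if … : … ; break` loop
def pvFindBack (date_key region : String) (c : Int)
    (st : PySem.Dict String (PySem.Dict String Int)) :
    List String → PySem.Dict String (PySem.Dict String Int)
  | [] => st
  | b :: rest =>
    if b < date_key ∧ (st.getD b PySem.Dict.empty).contains region then
      st.modify b PySem.Dict.empty
        (fun day => day.insert region (day.getD region 0 + c))
    else pvFindBack date_key region c st rest

-- body of `for region in covid_cases[date_key]`
-- (keys taken from the dict are always present, so `getD … 0` reads exactly d[k])
def pvARegion (ks : List String) (date_key : String)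
    (st : PySem.Dict String (PySem.Dict String Int)) (region : String) :
    PySem.Dict String (PySem.Dict String Int) :=
  if (st.getD date_key PySem.Dict.empty).getD region 0 < 0 then
    let cases_for_move := (st.getD date_key PySem.Dict.empty).getD region 0
    let st := st.modify date_key PySem.Dict.empty (fun day => day.insert region 0)
    pvFindBack date_key region cases_for_move st ks
  else st

-- body of `for date_key in covid_cases_date_keys_desc`
def pvAStep (ks : List String) (st : PySem.Dict String (PySem.Dict String Int))
    (date_key : String) : PySem.Dict String (PySem.Dict String Int) :=
  ((st.getD date_key PySem.Dict.empty).keys).foldl (pvARegion ks date_key) st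

def repair_negative_cases (covid_cases : List (String × List (String × Int))) :
    List (String × List (String × Int)) :=
  let cc : PySem.Dict String (PySem.Dict String Int) :=
    PySem.Dict.mk (covid_cases.map (fun p => (p.1, PySem.Dict.mk p.2)))
  let covid_cases_date_keys_desc := PySem.List.sorted cc.keys (fun x => x) true
  let fin := covid_cases_date_keys_desc.foldl (pvAStep covid_cases_date_keys_desc) cc
  fin.items.map (fun p => (p.1, p.2.items))

-- ===== PORT B =====
-- body of B's `for region in day`
def pvBRegion (date_key : String)
    (q : PySem.Dict String (PySem.Dict String Int) × PySem.Dict String Int)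
    (region : String) :
    PySem.Dict String (PySem.Dict String Int) × PySem.Dict String Int :=
  let v := (q.1.getD date_key PySem.Dict.empty).getD region 0 + q.2.getD region 0
  (q.1.modify date_key PySem.Dict.empty (fun day => day.insert region (max v 0)),
   q.2.insert region (min v 0))

-- body of B's `for date_key in sorted(covid_cases, reverse=True)`
def pvBStep (p : PySem.Dict String (PySem.Dict String Int) × PySem.Dict String Int)
    (date_key : String) :
    PySem.Dict String (PySem.Dict String Int) × PySem.Dict String Int :=
  ((p.1.getD date_key PySem.Dict.empty).keys).foldl (pvBRegion date_key) p

def repair_negative_cases_alt (covid_cases : List (String × List (String × Int))) :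
    List (String × List (String × Int)) :=
  let cc : PySem.Dict String (PySem.Dict String Int) :=
    PySem.Dict.mk (covid_cases.map (fun p => (p.1, PySem.Dict.mk p.2)))
  let ks := PySem.List.sorted cc.keys (fun x => x) true
  let res := ks.foldl pvBStep (cc, (PySem.Dict.empty : PySem.Dict String Int))
  res.1.items.map (fun p => (p.1, p.2.items))

-- ===== PRECONDITION & SPEC =====
-- Pre_ excludes association lists with a duplicate outer date key or a duplicate
-- region key inside one day: a Python dict cannot hold duplicate keys, so such
-- lists correspond to no input of the Python function.
def Pre_repair_negative_cases (covid_cases : List (String × List (String × Int))) : Prop :=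
  (covid_cases.map Prod.fst).Nodup ∧ ∀ p ∈ covid_cases, (p.2.map Prod.fst).Nodup
instance (covid_cases : List (String × List (String × Int))) : Decidable (Pre_repair_negative_cases covid_cases) := by unfold Pre_repair_negative_cases; infer_instance
def pvWitness_repair_negative_cases : (List (String × List (String × Int))) :=
  [("2020-01-02", [("A", -1), ("B", 3)]), ("2020-01-01", [("A", 5)])]
def Spec_repair_negative_cases (covid_cases : List (String × List (String × Int))) (out : List (String × List (String × Int))) : Prop := out = repair_negative_cases_alt covid_cases
instance (covid_cases : List (String × List (String × Int))) (out : List (String × List (String × Int))) : Decidable (Spec_repair_negative_cases covid_cases out) := by unfold Spec_repair_negative_cases; infer_instance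

-- ===== CLAIM (what is proved, stated in full; the proofs are below) =====
def Claim_equal_repair_negative_cases : Prop := ∀ (covid_cases : List (String × List (String × Int))), Dom_repair_negative_cases covid_cases → Pre_repair_negative_cases covid_cases → Spec_repair_negative_cases covid_cases (repair_negative_cases covid_cases)

-- ===== LEMMAS AND PROOFS =====

-- value of a cell (k, r); 0 / empty defaults only reachable off the existing keys
def pvGetv (st : PySem.Dict String (PySem.Dict String Int)) (k r : String) : Int :=
  (st.getD k PySem.Dict.empty).getD r 0

def pvHasR (cc : PySem.Dict String (PySem.Dict String Int)) (k r : String) : Bool :=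
  (cc.getD k PySem.Dict.empty).contains r

-- first date in the list whose day contains region r (shape is fixed, read off cc)
def pvFirstC (cc : PySem.Dict String (PySem.Dict String Int)) (r : String) :
    List String → Option String
  | [] => none
  | b :: t => if pvHasR cc b r then some b else pvFirstC cc r t

-- both loops only overwrite values at existing cells: the key structure is cc's
def pvShape (cc st : PySem.Dict String (PySem.Dict String Int)) : Prop :=
  st.keys = cc.keys ∧
  ∀ k, (st.getD k PySem.Dict.empty).keys = (cc.getD k PySem.Dict.empty).keys

-- unguarded first-hit add: what pvFindBack does on the strict suffix
def pvAddFirst (region : String) (c : Int)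
    (st : PySem.Dict String (PySem.Dict String Int)) :
    List String → PySem.Dict String (PySem.Dict String Int)
  | [] => st
  | b :: rest =>
    if (st.getD b PySem.Dict.empty).contains region then
      st.modify b PySem.Dict.empty
        (fun day => day.insert region (day.getD region 0 + c))
    else pvAddFirst region c st rest
theorem pv_getv_setg (st : PySem.Dict String (PySem.Dict String Int))
    (k r : String) (g : PySem.Dict String Int → Int) (k' r' : String) :
    pvGetv (st.modify k PySem.Dict.empty (fun day => day.insert r (g day))) k' r' =
      if k' = k ∧ r' = r then g (st.getD k PySem.Dict.empty) else pvGetv st k' r' := by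
  simp only [pvGetv, PySem.Dict.getD_modify]
  by_cases hk : k' = k <;> by_cases hr : r' = r <;>
    simp [hk, hr, PySem.Dict.getD_insert]

theorem pv_hasR_outer (cc : PySem.Dict String (PySem.Dict String Int))
    (k r : String) (h : pvHasR cc k r = true) : k ∈ cc.keys := by
  by_contra hk
  have hc : cc.contains k = false := by
    rw [PySem.Dict.contains_eq_decide_mem_keys]; simpa using hk
  rw [pvHasR, PySem.Dict.getD_of_not_contains _ _ hc, PySem.Dict.contains_empty] at h
  exact Bool.false_ne_true h

theorem pv_hasR_of_shape (cc st : PySem.Dict String (PySem.Dict String Int))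
    (hs : pvShape cc st) (k r : String) : pvHasR st k r = pvHasR cc k r := by
  simp only [pvHasR, PySem.Dict.contains_eq_decide_mem_keys, hs.2 k]

theorem pv_shape_setg (cc st : PySem.Dict String (PySem.Dict String Int))
    (k r : String) (g : PySem.Dict String Int → Int)
    (hs : pvShape cc st) (hr : pvHasR cc k r = true) :
    pvShape cc (st.modify k PySem.Dict.empty (fun day => day.insert r (g day))) := by
  have hkmem : k ∈ cc.keys := pv_hasR_outer cc k r hr
  have hcst : st.contains k = true := by
    rw [PySem.Dict.contains_eq_decide_mem_keys, hs.1]; simpa using hkmem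
  have hrin : (st.getD k PySem.Dict.empty).contains r = true :=
    (pv_hasR_of_shape cc st hs k r).trans hr
  constructor
  · rw [PySem.Dict.keys_modify, PySem.Dict.keys_insert_of_contains _ _ hcst, hs.1]
  · intro k0
    rw [PySem.Dict.getD_modify]
    split_ifs with hk0
    · subst hk0; rw [PySem.Dict.keys_insert_of_contains _ _ hrin]; exact hs.2 _
    · exact hs.2 k0

theorem pv_firstC_mem (cc : PySem.Dict String (PySem.Dict String Int))
    (r : String) (l : List String) (x : String) (h : pvFirstC cc r l = some x) : x ∈ l := by
  induction l with
  | nil => simp [pvFirstC] at h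
  | cons b t ih =>
    rw [pvFirstC] at h
    by_cases hb : pvHasR cc b r = true
    · rw [if_pos hb] at h; simp at h; simp [h]
    · rw [if_neg hb] at h; exact List.mem_cons_of_mem _ (ih h)

theorem pv_findBack_eq_addFirst (date_key region : String) (c : Int)
    (st : PySem.Dict String (PySem.Dict String Int))
    (pre rest : List String)
    (hpre : ∀ b ∈ pre, ¬ b < date_key) (hrest : ∀ b ∈ rest, b < date_key) :
    pvFindBack date_key region c st (pre ++ rest) = pvAddFirst region c st rest := by
  induction pre with
  | nil =>
    simp only [List.nil_append]
    induction rest with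
    | nil => rfl
    | cons b t ih =>
      rw [pvFindBack, pvAddFirst]
      have hb : b < date_key := hrest b (List.mem_cons_self ..)
      by_cases hc : (st.getD b PySem.Dict.empty).contains region = true
      · rw [if_pos ⟨hb, hc⟩, if_pos hc]
      · rw [if_neg (by tauto), if_neg hc]
        exact ih (fun x hx => hrest x (List.mem_cons_of_mem _ hx))
  | cons b t ih =>
    rw [List.cons_append, pvFindBack,
      if_neg (by exact fun hcon => hpre b (List.mem_cons_self ..) hcon.1)]
    exact ih (fun x hx => hpre x (List.mem_cons_of_mem _ hx))

theorem pv_getv_addFirst (cc st : PySem.Dict String (PySem.Dict String Int))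
    (hs : pvShape cc st) (r : String) (c : Int) (rest : List String) (k' r' : String) :
    pvGetv (pvAddFirst r c st rest) k' r' =
      pvGetv st k' r' +
        (if r' = r ∧ pvFirstC cc r rest = some k' then c else 0) := by
  induction rest with
  | nil => simp [pvAddFirst, pvFirstC]
  | cons b t ih =>
    rw [pvAddFirst, pvFirstC]
    have hhh : (st.getD b PySem.Dict.empty).contains r = pvHasR cc b r :=
      pv_hasR_of_shape cc st hs b r
    by_cases hb : pvHasR cc b r = true
    · rw [hhh, if_pos hb, if_pos hb,
        pv_getv_setg st b r (fun day => day.getD r 0 + c) k' r']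
      by_cases hk : k' = b <;> by_cases hr : r' = r
      · subst hk; subst hr; simp [pvGetv]
      · simp [hk, hr]
      · rw [if_neg (fun hh => hk hh.1),
          if_neg (fun hh => hk (Option.some.inj hh.2).symm)]
        simp
      · simp [hk, hr]
    · rw [hhh, if_neg hb, if_neg hb, ih]

theorem pv_shape_addFirst (cc st : PySem.Dict String (PySem.Dict String Int))
    (hs : pvShape cc st) (r : String) (c : Int) (rest : List String) :
    pvShape cc (pvAddFirst r c st rest) := by
  induction rest with
  | nil => exact hs
  | cons b t ih =>
    rw [pvAddFirst]
    by_cases hb : (st.getD b PySem.Dict.empty).contains r = true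
    · rw [if_pos hb]
      exact pv_shape_setg cc st b r _ hs ((pv_hasR_of_shape cc st hs b r).symm.trans hb)
    · rw [if_neg hb]; exact ih
theorem pv_inner (cc : PySem.Dict String (PySem.Dict String Int))
    (ks : List String) (k : String) (rest : List String)
    (hred : ∀ (st : PySem.Dict String (PySem.Dict String Int)) (r : String) (c : Int),
      pvFindBack k r c st ks = pvAddFirst r c st rest)
    (hknr : k ∉ rest) :
    ∀ (rs : List String) (stA stB : PySem.Dict String (PySem.Dict String Int))
      (debt : PySem.Dict String Int),
      pvShape cc stA → pvShape cc stB →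
      (∀ r ∈ rs, pvHasR cc k r = true) → rs.Nodup →
      (∀ k' r', pvGetv stA k' r' = pvGetv stB k' r' +
        (if pvFirstC cc r' (if r' ∈ rs then k :: rest else rest) = some k'
         then debt.getD r' 0 else 0)) →
      pvShape cc (rs.foldl (pvARegion ks k) stA) ∧
      pvShape cc (rs.foldl (pvBRegion k) (stB, debt)).1 ∧
      (∀ k' r', pvGetv (rs.foldl (pvARegion ks k) stA) k' r' =
        pvGetv (rs.foldl (pvBRegion k) (stB, debt)).1 k' r' +
          (if pvFirstC cc r' rest = some k'
           then (rs.foldl (pvBRegion k) (stB, debt)).2.getD r' 0 else 0)) := by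
  intro rs
  induction rs with
  | nil =>
    intro stA stB debt hsA hsB _ _ hinv
    refine ⟨hsA, hsB, ?_⟩
    intro k' r'
    simpa using hinv k' r'
  | cons r rs' ih =>
    intro stA stB debt hsA hsB hhas hnd hinv
    have hr : pvHasR cc k r = true := hhas r (List.mem_cons_self ..)
    have hfc : pvFirstC cc r (k :: rest) = some k := by rw [pvFirstC, if_pos hr]
    have hrnotin : r ∉ rs' := (List.nodup_cons.mp hnd).1
    have hknrest : pvFirstC cc r rest ≠ some k :=
      fun hx => hknr (pv_firstC_mem cc r rest k hx)
    have hval : pvGetv stA k r = pvGetv stB k r + debt.getD r 0 := by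
      have := hinv k r
      rw [if_pos (List.mem_cons_self ..), hfc, if_pos rfl] at this
      exact this
    have hB1 : pvBRegion k (stB, debt) r =
        (stB.modify k PySem.Dict.empty
          (fun day => day.insert r
            (max ((stB.getD k PySem.Dict.empty).getD r 0 + debt.getD r 0) 0)),
         debt.insert r
            (min ((stB.getD k PySem.Dict.empty).getD r 0 + debt.getD r 0) 0)) := rfl
    set v : Int := (stB.getD k PySem.Dict.empty).getD r 0 + debt.getD r 0 with hvdef
    have hveq : pvGetv stA k r = v := hval
    have hvA : (stA.getD k PySem.Dict.empty).getD r 0 = v := hveq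
    have hsB1 : pvShape cc (stB.modify k PySem.Dict.empty
        (fun day => day.insert r (max v 0))) :=
      pv_shape_setg cc stB k r (fun _ => max v 0) hsB hr
    have hgB1 : ∀ k' r', pvGetv (stB.modify k PySem.Dict.empty
        (fun day => day.insert r (max v 0))) k' r' =
        if k' = k ∧ r' = r then max v 0 else pvGetv stB k' r' :=
      fun k' r' => pv_getv_setg stB k r (fun _ => max v 0) k' r'
    have hdget : ∀ r', (debt.insert r (min v 0)).getD r' 0 =
        if r' = r then min v 0 else debt.getD r' 0 := by
      intro r'; rw [PySem.Dict.getD_insert]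
    by_cases hv : (stA.getD k PySem.Dict.empty).getD r 0 < 0
    · -- negative: A moves it backwards, B records a debt
      have hv' : v < 0 := by omega
      have hmax : max v 0 = 0 := by omega
      have hmin : min v 0 = v := by omega
      have hA1 : pvARegion ks k stA r =
          pvAddFirst r (pvGetv stA k r)
            (stA.modify k PySem.Dict.empty (fun day => day.insert r 0)) rest := by
        simp only [pvARegion, if_pos hv]
        exact hred _ _ _
      have hsA0 : pvShape cc (stA.modify k PySem.Dict.empty
          (fun day => day.insert r 0)) :=
        pv_shape_setg cc stA k r (fun _ => 0) hsA hr
      have hsA1 : pvShape cc (pvARegion ks k stA r) := by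
        rw [hA1]; exact pv_shape_addFirst cc _ hsA0 r _ rest
      have hgA0 : ∀ k' r', pvGetv (stA.modify k PySem.Dict.empty
          (fun day => day.insert r 0)) k' r' =
          if k' = k ∧ r' = r then 0 else pvGetv stA k' r' :=
        fun k' r' => pv_getv_setg stA k r (fun _ => 0) k' r'
      have hinv' : ∀ k' r', pvGetv (pvARegion ks k stA r) k' r' =
          pvGetv (stB.modify k PySem.Dict.empty
            (fun day => day.insert r (max v 0))) k' r' +
          (if pvFirstC cc r' (if r' ∈ rs' then k :: rest else rest) = some k'
           then (debt.insert r (min v 0)).getD r' 0 else 0) := by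
        intro k' r'
        rw [hA1, pv_getv_addFirst cc _ hsA0 r _ rest, hgA0, hgB1, hdget, hmax, hmin]
        by_cases hrr : r' = r
        · subst hrr
          rw [if_neg hrnotin]
          by_cases hkk : k' = k
          · subst hkk
            simp [hknrest]
          · have hstep := hinv k' r'
            rw [if_pos (List.mem_cons_self ..), hfc,
              if_neg (fun hh => hkk (Option.some.inj hh).symm), add_zero] at hstep
            have hc1 : ¬ (k' = k ∧ r' = r') := fun hh => hkk hh.1
            rw [if_neg hc1, if_neg hc1, hstep, hveq]
            by_cases hfr : pvFirstC cc r' rest = some k'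
            · rw [if_pos ⟨rfl, hfr⟩, if_pos hfr, if_pos rfl]
            · rw [if_neg (fun hh => hfr hh.2), if_neg hfr]
        · have hstep := hinv k' r'
          simp only [List.mem_cons, eq_false hrr, false_or] at hstep
          have hc2 : ¬ (k' = k ∧ r' = r) := fun hh => hrr hh.2
          have hc3 : ¬ (r' = r ∧ pvFirstC cc r rest = some k') := fun hh => hrr hh.1
          rw [if_neg hc2, if_neg hc2, if_neg hc3, if_neg hrr, add_zero]
          exact hstep
      have hres := ih (pvARegion ks k stA r)
          (stB.modify k PySem.Dict.empty (fun day => day.insert r (max v 0)))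
          (debt.insert r (min v 0)) hsA1 hsB1
          (fun x hx => hhas x (List.mem_cons_of_mem _ hx)) (List.nodup_cons.mp hnd).2 hinv'
      rw [List.foldl_cons, List.foldl_cons, hB1]
      exact hres
    · -- non-negative: A leaves the cell, B absorbs the (zero) debt
      have hv' : 0 ≤ v := by omega
      have hmax : max v 0 = v := by omega
      have hmin : min v 0 = 0 := by omega
      have hA1 : pvARegion ks k stA r = stA := by
        simp only [pvARegion, if_neg hv]
      have hinv' : ∀ k' r', pvGetv stA k' r' =
          pvGetv (stB.modify k PySem.Dict.empty
            (fun day => day.insert r (max v 0))) k' r' +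
          (if pvFirstC cc r' (if r' ∈ rs' then k :: rest else rest) = some k'
           then (debt.insert r (min v 0)).getD r' 0 else 0) := by
        intro k' r'
        rw [hgB1, hdget, hmax, hmin]
        by_cases hrr : r' = r
        · subst hrr
          rw [if_neg hrnotin]
          by_cases hkk : k' = k
          · subst hkk
            rw [if_pos ⟨rfl, rfl⟩, hveq]
            simp
          · have hstep := hinv k' r'
            rw [if_pos (List.mem_cons_self ..), hfc,
              if_neg (fun hh => hkk (Option.some.inj hh).symm), add_zero] at hstep
            have hc1 : ¬ (k' = k ∧ r' = r') := fun hh => hkk hh.1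
            rw [if_neg hc1, hstep, if_pos rfl]
            simp
        · have hstep := hinv k' r'
          simp only [List.mem_cons, eq_false hrr, false_or] at hstep
          have hc2 : ¬ (k' = k ∧ r' = r) := fun hh => hrr hh.2
          rw [if_neg hc2, if_neg hrr]
          exact hstep
      have hres := ih stA
          (stB.modify k PySem.Dict.empty (fun day => day.insert r (max v 0)))
          (debt.insert r (min v 0)) hsA hsB1
          (fun x hx => hhas x (List.mem_cons_of_mem _ hx)) (List.nodup_cons.mp hnd).2 hinv'
      rw [List.foldl_cons, List.foldl_cons, hA1, hB1]
      exact hres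
theorem pv_outer (cc : PySem.Dict String (PySem.Dict String Int))
    (ks : List String) (hnd : ∀ k, (cc.getD k PySem.Dict.empty).keys.Nodup) :
    ∀ (suffix pre : List String), ks = pre ++ suffix →
      List.Pairwise (fun a b => b < a) ks →
      ∀ (stA stB : PySem.Dict String (PySem.Dict String Int))
        (debt : PySem.Dict String Int),
        pvShape cc stA → pvShape cc stB →
        (∀ k' r', pvGetv stA k' r' = pvGetv stB k' r' +
          (if pvFirstC cc r' suffix = some k' then debt.getD r' 0 else 0)) →
        pvShape cc (suffix.foldl (pvAStep ks) stA) ∧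
        pvShape cc (suffix.foldl pvBStep (stB, debt)).1 ∧
        (∀ k' r', pvGetv (suffix.foldl (pvAStep ks) stA) k' r' =
          pvGetv (suffix.foldl pvBStep (stB, debt)).1 k' r') := by
  intro suffix
  induction suffix with
  | nil =>
    intro pre _ _ stA stB debt hsA hsB hinv
    refine ⟨hsA, hsB, ?_⟩
    intro k' r'
    simpa [pvFirstC] using hinv k' r'
  | cons k rest' ih =>
    intro pre hks hpair stA stB debt hsA hsB hinv
    have hpair' := hpair
    rw [hks] at hpair'
    obtain ⟨hp1, hp2, hp3⟩ := List.pairwise_append.mp hpair'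
    have hrest_lt : ∀ b ∈ rest', b < k := (List.pairwise_cons.mp hp2).1
    have hknr : k ∉ rest' := fun hk => lt_irrefl k (hrest_lt k hk)
    have hpre' : ∀ b ∈ pre ++ [k], ¬ b < k := by
      intro b hb
      rcases List.mem_append.mp hb with hb | hb
      · exact lt_asymm (hp3 b hb k (List.mem_cons_self ..))
      · simp at hb; subst hb; exact lt_irrefl _
    have hred : ∀ (st : PySem.Dict String (PySem.Dict String Int)) (r : String) (c : Int),
        pvFindBack k r c st ks = pvAddFirst r c st rest' := by
      intro st r c
      rw [hks, show pre ++ k :: rest' = (pre ++ [k]) ++ rest' by simp]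
      exact pv_findBack_eq_addFirst k r c st (pre ++ [k]) rest' hpre' hrest_lt
    set rs0 : List String := (cc.getD k PySem.Dict.empty).keys with hrs0
    have hhas0 : ∀ r ∈ rs0, pvHasR cc k r = true := by
      intro r hr
      exact (PySem.Dict.contains_iff_mem_keys _ r).mpr hr
    have hAstep : pvAStep ks stA k = rs0.foldl (pvARegion ks k) stA := by
      simp only [pvAStep, hsA.2 k]
      rw [← hrs0]
    have hBstep : pvBStep (stB, debt) k = rs0.foldl (pvBRegion k) (stB, debt) := by
      simp only [pvBStep, hsB.2 k]
      rw [← hrs0]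
    have hinv0 : ∀ k' r', pvGetv stA k' r' = pvGetv stB k' r' +
        (if pvFirstC cc r' (if r' ∈ rs0 then k :: rest' else rest') = some k'
         then debt.getD r' 0 else 0) := by
      intro k' r'
      by_cases hm : r' ∈ rs0
      · rw [if_pos hm]; exact hinv k' r'
      · rw [if_neg hm]
        have hnot : ¬ pvHasR cc k r' = true := by
          simp only [pvHasR, PySem.Dict.contains_eq_decide_mem_keys]
          simpa using hm
        have := hinv k' r'
        rw [pvFirstC, if_neg hnot] at this
        exact this
    obtain ⟨hsA', hsB', hinv1⟩ :=
      pv_inner cc ks k rest' hred hknr rs0 stA stB debt hsA hsB hhas0 (hnd k) hinv0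
    have := ih (pre ++ [k]) (by simp [hks])
      hpair _ _ _ hsA' hsB' hinv1
    rw [List.foldl_cons, List.foldl_cons, hAstep, hBstep]
    exact this
theorem pv_glue (covid_cases : List (String × List (String × Int)))
    (hpre : Pre_repair_negative_cases covid_cases) :
    repair_negative_cases covid_cases = repair_negative_cases_alt covid_cases := by
  obtain ⟨hnd1, hnd2⟩ := hpre
  simp only [repair_negative_cases, repair_negative_cases_alt]
  set cc : PySem.Dict String (PySem.Dict String Int) :=
    PySem.Dict.mk (covid_cases.map (fun p => (p.1, PySem.Dict.mk p.2))) with hcc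
  set ks : List String := PySem.List.sorted cc.keys (fun x => x) true with hks
  have hitems : cc.items = covid_cases.map (fun p => (p.1, PySem.Dict.mk p.2)) := rfl
  have hkeys : cc.keys = covid_cases.map Prod.fst := by
    simp [PySem.Dict.keys, hitems, List.map_map]
  have hndk : cc.keys.Nodup := by rw [hkeys]; exact hnd1
  have hndin : ∀ k, (cc.getD k PySem.Dict.empty).keys.Nodup := by
    intro k
    cases hg : cc.get? k with
    | none =>
      rw [PySem.Dict.getD_of_get?_eq_none _ _ hg, PySem.Dict.keys_empty]
      exact List.nodup_nil
    | some d =>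
      rw [PySem.Dict.getD_of_get?_eq_some _ _ hg]
      have hmem : (k, d) ∈ cc.items := PySem.Dict.mem_items_of_get?_eq_some cc hg
      rw [hitems] at hmem
      obtain ⟨p, hp, hpe⟩ := List.mem_map.mp hmem
      have hd : d = PySem.Dict.mk p.2 := by
        have := congrArg Prod.snd hpe; simpa using this.symm
      subst hd
      have : (PySem.Dict.mk p.2).keys = p.2.map Prod.fst := by
        simp [PySem.Dict.keys]
      rw [this]
      exact hnd2 p hp
  have hpair : List.Pairwise (fun a b : String => b < a) ks := by
    have h1 : List.Pairwise (fun a b : String => b ≤ a) ks :=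
      PySem.List.sorted_pairwise_rev cc.keys (fun x => x)
    have h2 : ks.Nodup :=
      ((PySem.List.sorted_perm cc.keys (fun x => x) true).symm).nodup hndk
    exact (h1.and h2).imp (fun hab => lt_of_le_of_ne hab.1 (Ne.symm hab.2))
  have hshape0 : pvShape cc cc := ⟨rfl, fun _ => rfl⟩
  obtain ⟨hsA, hsB, heq⟩ := pv_outer cc ks hndin ks [] rfl hpair cc cc
    PySem.Dict.empty hshape0 hshape0
    (by intro k' r'; simp [PySem.Dict.getD_empty])
  have hfin : ks.foldl (pvAStep ks) cc = (ks.foldl pvBStep (cc, PySem.Dict.empty)).1 := by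
    apply PySem.Dict.ext
    rw [PySem.Dict.items_eq_map_keys _ (hsA.1 ▸ hndk) PySem.Dict.empty,
      PySem.Dict.items_eq_map_keys _ (hsB.1 ▸ hndk) PySem.Dict.empty,
      hsA.1, hsB.1]
    apply List.map_congr_left
    intro k _
    have hinner : (ks.foldl (pvAStep ks) cc).getD k PySem.Dict.empty =
        ((ks.foldl pvBStep (cc, PySem.Dict.empty)).1).getD k PySem.Dict.empty := by
      apply PySem.Dict.ext
      rw [PySem.Dict.items_eq_map_keys _ (hsA.2 k ▸ hndin k) (0 : Int),
        PySem.Dict.items_eq_map_keys _ (hsB.2 k ▸ hndin k) (0 : Int),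
        hsA.2 k, hsB.2 k]
      apply List.map_congr_left
      intro r _
      have := heq k r
      simp only [pvGetv] at this
      rw [this]
    rw [hinner]
  rw [hfin]

-- ===== VERDICT (by name: the statement is the Claim_ definition above) =====
theorem repair_negative_cases_spec : Claim_equal_repair_negative_cases := by
  unfold Claim_equal_repair_negative_cases
  intro covid_cases _ hpre
  unfold Spec_repair_negative_cases
  exact pv_glue covid_cases hpre
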